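-- pv_equiv track=rewrite | github.com/cam3914/websci | streamCrawler.py | get_multiples_indicies
-- ===== SOURCE A (Python) =====
-- def get_multiples_indicies(chars):
--     indicies = []
--     newLetter = True
--     for i in range(0, len(chars) - 1):
--         if chars[i] == chars [i + 1]:
--             if newLetter:
--                 indicies.append(i)
--                 newLetter = False
--         else:
--             newLetter = True
--
--     return indicies
-- ===== SOURCE B (Python) =====
-- def get_multiples_indicies(chars):
--     indicies = []
--     i = 0
--     n = len(chars)
--     while i < n:
--         j = i + 1
--         while j < n and chars[j] == chars[i]:
--             j += 1
--         if j - i >= 2: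
--             indicies.append(i)
--         i = j
--     return indicies
-- ===== Notes on version B (the rewrite author's own statement) =====
-- stated objective: alternative
-- what changed: Replaced A's single adjacent-pair loop with a boolean new-run flag by a run-scanning two-level loop that finds each maximal run and records its start when its length is >= 2.
import Mathlib
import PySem

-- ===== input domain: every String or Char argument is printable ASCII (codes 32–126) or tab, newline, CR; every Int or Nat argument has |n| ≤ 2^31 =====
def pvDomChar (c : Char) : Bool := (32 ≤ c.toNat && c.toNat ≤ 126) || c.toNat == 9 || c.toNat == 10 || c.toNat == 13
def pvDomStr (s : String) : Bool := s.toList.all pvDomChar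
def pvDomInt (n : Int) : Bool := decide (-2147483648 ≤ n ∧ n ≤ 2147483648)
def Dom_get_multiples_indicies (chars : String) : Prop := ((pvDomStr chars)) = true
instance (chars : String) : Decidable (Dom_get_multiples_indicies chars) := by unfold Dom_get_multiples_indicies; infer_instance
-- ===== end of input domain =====

-- B is an alternative, not faster: it replaces A's adjacent-pair loop with a new-run flag
-- by a run-scanning loop over maximal runs, recording each run start when the run length is ≥ 2.

-- ===== PORT A =====
-- A's `for i in range(0, len(chars)-1)` comparing chars[i] with chars[i+1] is the structural
-- recursion over adjacent pairs of the char list, carrying the index i, the accumulator and the flag.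
def pvGoA : List Char → Int → List Int → Bool → List Int
  | c1 :: c2 :: rest, i, acc, newLetter =>
      if c1 == c2 then
        if newLetter then pvGoA (c2 :: rest) (i + 1) (acc ++ [i]) false
        else pvGoA (c2 :: rest) (i + 1) acc false
      else pvGoA (c2 :: rest) (i + 1) acc true
  | _, _, acc, _ => acc

def get_multiples_indicies (chars : String) : List Int := pvGoA chars.toList 0 [] true

-- ===== PORT B =====
-- inner `while j < n and chars[j] == chars[i]` = length of the longest prefix equal to the run's char
def pvCw (c : Char) (l : List Char) : Nat := (l.takeWhile (fun d => d == c)).length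

-- outer while loop: one step per maximal run, advancing the position by the run length
def pvGoB : List Char → Int → List Int
  | [], _ => []
  | c :: rest, pos =>
      let m := pvCw c rest
      (if 1 + m ≥ 2 then [pos] else []) ++ pvGoB (rest.drop m) (pos + (1 + (m : Int)))
  termination_by l _ => l.length
  decreasing_by simp [List.length_drop]

def get_multiples_indicies_alt (chars : String) : List Int := pvGoB chars.toList 0

-- ===== PRECONDITION & SPEC =====
def Spec_get_multiples_indicies (chars : String) (out : List Int) : Prop := out = get_multiples_indicies_alt chars
instance (chars : String) (out : List Int) : Decidable (Spec_get_multiples_indicies chars out) := by unfold Spec_get_multiples_indicies; infer_instance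

-- ===== CLAIM (what is proved, stated in full; the proofs are below) =====
def Claim_equal_get_multiples_indicies : Prop := ∀ (chars : String), Dom_get_multiples_indicies chars → Spec_get_multiples_indicies chars (get_multiples_indicies chars)

-- ===== LEMMAS AND PROOFS =====

theorem pvGoB_nil (p : Int) : pvGoB [] p = [] := by
  unfold pvGoB
  rfl

theorem pvGoB_cons (c : Char) (rest : List Char) (p : Int) :
    pvGoB (c :: rest) p = (if 1 + pvCw c rest ≥ 2 then [p] else [])
      ++ pvGoB (rest.drop (pvCw c rest)) (p + (1 + (pvCw c rest : Int))) := by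
  conv_lhs => unfold pvGoB

theorem pvMain (n : Nat) : ∀ cs : List Char, cs.length ≤ n →
    ((∀ (i : Int) (acc : List Int), pvGoA cs i acc true = acc ++ pvGoB cs i) ∧
     (∀ (c : Char) (rest : List Char) (j : Int) (acc : List Int), cs = c :: rest →
        pvGoA cs j acc false = acc ++ pvGoB (rest.drop (pvCw c rest)) (j + 1 + (pvCw c rest : Int)))) := by
  induction n with
  | zero =>
    intro cs hlen
    have : cs = [] := List.eq_nil_of_length_eq_zero (Nat.le_zero.mp hlen)
    subst this
    constructor
    · intro i acc; simp [pvGoA, pvGoB_nil]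
    · intro c rest j acc h; cases h
  | succ n ih =>
    intro cs hlen
    match cs with
    | [] =>
      constructor
      · intro i acc; simp [pvGoA, pvGoB_nil]
      · intro c rest j acc h; cases h
    | c :: rest =>
      have hr : rest.length ≤ n := by simpa using hlen
      -- second conjunct first: the "inside a run" (newLetter = false) state
      have F : ∀ (j : Int) (acc : List Int),
          pvGoA (c :: rest) j acc false = acc ++ pvGoB (rest.drop (pvCw c rest)) (j + 1 + (pvCw c rest : Int)) := by
        intro j acc
        match rest with
        | [] => simp [pvGoA, pvCw, pvGoB_nil]
        | d :: rest' =>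
          by_cases hcd : c = d
          · subst hcd
            have hF := (ih (c :: rest') (by simpa using hr)).2 c rest' (j+1) acc rfl
            rw [show pvGoA (c :: c :: rest') j acc false = pvGoA (c :: rest') (j+1) acc false by
                  simp [pvGoA]]
            rw [hF]
            have hcw : pvCw c (c :: rest') = 1 + pvCw c rest' := by simp [pvCw]; omega
            rw [hcw]
            have hdrop : (c :: rest').drop (1 + pvCw c rest') = rest'.drop (pvCw c rest') := by
              rw [Nat.add_comm, List.drop_succ_cons]
            rw [hdrop]
            have harith : j + 1 + 1 + (pvCw c rest' : Int) = j + 1 + ((1 + pvCw c rest' : Nat) : Int) := by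
              push_cast; ring
            rw [harith]
          · have hT := (ih (d :: rest') (by simpa using hr)).1 (j+1) acc
            rw [show pvGoA (c :: d :: rest') j acc false = pvGoA (d :: rest') (j+1) acc true by
                  simp [pvGoA, hcd]]
            rw [hT]
            have hdc : (d == c) = false := beq_eq_false_iff_ne.mpr (fun h => hcd h.symm)
            have hcw : pvCw c (d :: rest') = 0 := by
              simp [pvCw, hdc]
            rw [hcw]
            norm_num
      constructor
      · -- first conjunct: the "fresh run" (newLetter = true) state
        intro i acc
        match rest with
        | [] => simp [pvGoA, pvCw, pvGoB_cons, pvGoB_nil]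
        | d :: rest' =>
          by_cases hcd : c = d
          · subst hcd
            have hF := (ih (c :: rest') (by simpa using hr)).2 c rest' (i+1) (acc ++ [i]) rfl
            rw [show pvGoA (c :: c :: rest') i acc true = pvGoA (c :: rest') (i+1) (acc ++ [i]) false by
                  simp [pvGoA]]
            rw [hF]
            have hcw : pvCw c (c :: rest') = 1 + pvCw c rest' := by simp [pvCw]; omega
            conv_rhs => rw [pvGoB_cons]
            rw [hcw]
            have hdrop : (c :: rest').drop (1 + pvCw c rest') = rest'.drop (pvCw c rest') := by
              rw [Nat.add_comm, List.drop_succ_cons]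
            rw [hdrop]
            rw [if_pos (by omega)]
            have harith : i + 1 + 1 + (pvCw c rest' : Int) = i + (1 + (1 + (pvCw c rest' : Int))) := by ring
            simp only [List.append_assoc, List.cons_append, List.nil_append, harith]
            push_cast
            ring_nf
          · have hT := (ih (d :: rest') (by simpa using hr)).1 (i+1) acc
            have hdc : (d == c) = false := beq_eq_false_iff_ne.mpr (fun h => hcd h.symm)
            have hcw : pvCw c (d :: rest') = 0 := by
              simp [pvCw, hdc]
            conv_rhs => rw [pvGoB_cons]
            rw [hcw]
            rw [show pvGoA (c :: d :: rest') i acc true = pvGoA (d :: rest') (i+1) acc true by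
                  simp [pvGoA, hcd]]
            rw [hT]
            norm_num
      · intro c' rest' j acc h
        cases h
        exact F j acc

-- ===== VERDICT (by name: the statement is the Claim_ definition above) =====
theorem get_multiples_indicies_spec : Claim_equal_get_multiples_indicies := by
  intro chars _
  unfold Spec_get_multiples_indicies get_multiples_indicies get_multiples_indicies_alt
  simpa using (pvMain chars.toList.length chars.toList le_rfl).1 0 []
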